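-- pv_equiv track=rewrite | github.com/futuroptimist/axel | axel/merge.py | _classify_segments
-- ===== SOURCE A (Python) =====
-- from collections import Counter
--
-- _COMMENT_PREFIXES: tuple[str, ...] = (
--     "#",
--     "//",
--     "/*",
--     "*",
--     "--",
-- )
--
-- def _is_comment_line(line: str) -> bool:
--     stripped = line.strip()
--     if not stripped:
--         return True
--     for prefix in _COMMENT_PREFIXES:
--         if stripped.startswith(prefix):
--             return True
--     if stripped.endswith("-->") and stripped.startswith("<!--"):
--         return True
--     return False
--
-- def _prune_common_lines(
--     ours: list[str], theirs: list[str]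
-- ) -> tuple[list[str], list[str]]:
--     theirs_counter = Counter(theirs)
--     ours_unique: list[str] = []
--     for line in ours:
--         if theirs_counter.get(line, 0) > 0:
--             theirs_counter[line] -= 1
--         else:
--             ours_unique.append(line)
--     ours_counter = Counter(ours)
--     theirs_unique: list[str] = []
--     for line in theirs:
--         if ours_counter.get(line, 0) > 0:
--             ours_counter[line] -= 1
--         else:
--             theirs_unique.append(line)
--     return ours_unique, theirs_unique
--
-- def _classify_segments(segments: list[tuple[list[str], list[str]]]) -> str:
--     if not segments:
--         return "unknown"
--     for ours, theirs in segments: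
--         ours_unique, theirs_unique = _prune_common_lines(ours, theirs)
--         lines = [*ours_unique, *theirs_unique]
--         if not lines:
--             continue
--         if not all(_is_comment_line(line) for line in lines):
--             return "code"
--     return "comment_only"
-- ===== SOURCE B (Python) =====
-- from collections import Counter
--
-- _COMMENT_PREFIXES = ("#", "//", "/*", "*", "--")
--
--
-- def _is_comment_line(line):
--     stripped = line.strip()
--     if not stripped:
--         return True
--     for prefix in _COMMENT_PREFIXES:
--         if stripped.startswith(prefix):
--             return True
--     if stripped.endswith("-->") and stripped.startswith("<!--"):
--         return True
--     return False
--
--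
-- def _classify_segments(segments):
--     if not segments:
--         return "unknown"
--     for ours, theirs in segments:
--         ours_code = [l for l in ours if not _is_comment_line(l)]
--         theirs_code = [l for l in theirs if not _is_comment_line(l)]
--         if Counter(ours_code) != Counter(theirs_code):
--             return "code"
--     return "comment_only"
-- ===== Notes on version B (the rewrite author's own statement) =====
-- stated objective: simpler
-- what changed: Replaces the two-pass multiset prune (Counter decrement loops producing ours_unique/theirs_unique) plus all(...) comment scan with a filter-first decomposition: drop comment lines up front and compare the remaining code lines as Counters per segment.
import Mathlib
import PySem

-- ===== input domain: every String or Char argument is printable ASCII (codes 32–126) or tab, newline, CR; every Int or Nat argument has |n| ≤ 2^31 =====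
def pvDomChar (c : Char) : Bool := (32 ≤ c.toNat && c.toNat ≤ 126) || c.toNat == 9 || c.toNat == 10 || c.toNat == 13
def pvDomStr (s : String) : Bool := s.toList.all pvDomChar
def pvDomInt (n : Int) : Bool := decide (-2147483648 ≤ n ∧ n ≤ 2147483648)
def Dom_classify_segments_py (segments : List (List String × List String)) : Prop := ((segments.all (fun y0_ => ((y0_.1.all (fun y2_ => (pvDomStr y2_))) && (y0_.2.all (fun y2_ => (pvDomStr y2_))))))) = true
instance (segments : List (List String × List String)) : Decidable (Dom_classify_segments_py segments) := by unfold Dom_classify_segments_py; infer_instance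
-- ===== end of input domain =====

-- B replaces A's prune-common-lines-then-check-all-comments two-phase loop by: filter out
-- comment lines first, then compare the remaining code lines of the two sides as multisets
-- (objective: simpler decomposition; same asymptotic cost).

-- ===== PORT A =====
def pvCommentPrefixes : List String := ["#", "//", "/*", "*", "--"]

def is_comment_line (line : String) : Bool :=
  let stripped := PySem.Str.strip line
  if PySem.Str.len stripped == 0 then true
  else if pvCommentPrefixes.any (fun p => PySem.Str.startswith stripped p) then true
  else if PySem.Str.endswith stripped "-->" && PySem.Str.startswith stripped "<!--" then true
  else false

-- the 'for line in …' loops of _prune_common_lines, state = (counter, unique-lines accumulator)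
def pruneLoop : List String → PySem.Dict String Int → List String → PySem.Dict String Int × List String
  | [], c, acc => (c, acc)
  | line :: rest, c, acc =>
    if c.getD line 0 > 0 then
      pruneLoop rest (c.insert line (c.getD line 0 - 1)) acc
    else
      pruneLoop rest c (acc ++ [line])

def prune_common_lines (ours theirs : List String) : List String × List String :=
  let ours_unique := (pruneLoop ours (PySem.Dict.counter theirs) []).2
  let theirs_unique := (pruneLoop theirs (PySem.Dict.counter ours) []).2
  (ours_unique, theirs_unique)

def classifyLoopA : List (List String × List String) → String
  | [] => "comment_only"
  | (ours, theirs) :: rest =>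
    let u := prune_common_lines ours theirs
    let lines := u.1 ++ u.2
    if lines.isEmpty then classifyLoopA rest
    else if !(lines.all is_comment_line) then "code"
    else classifyLoopA rest

def classify_segments_py (segments : List (List String × List String)) : String :=
  if segments.isEmpty then "unknown" else classifyLoopA segments

-- ===== PORT B =====
def classifyLoopB : List (List String × List String) → String
  | [] => "comment_only"
  | (ours, theirs) :: rest =>
    let ours_code := ours.filter (fun l => !is_comment_line l)
    let theirs_code := theirs.filter (fun l => !is_comment_line l)
    -- Counter(ours_code) != Counter(theirs_code): multiset inequality
    if Multiset.ofList ours_code ≠ Multiset.ofList theirs_code then "code"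
    else classifyLoopB rest

def classify_segments_py_alt (segments : List (List String × List String)) : String :=
  if segments.isEmpty then "unknown" else classifyLoopB segments

-- ===== PRECONDITION & SPEC =====
def Spec_classify_segments_py (segments : List (List String × List String)) (out : String) : Prop := out = classify_segments_py_alt segments
instance (segments : List (List String × List String)) (out : String) : Decidable (Spec_classify_segments_py segments out) := by unfold Spec_classify_segments_py; infer_instance

-- ===== CLAIM (what is proved, stated in full; the proofs are below) =====
def Claim_equal_classify_segments_py : Prop := ∀ (segments : List (List String × List String)), Dom_classify_segments_py segments → Spec_classify_segments_py segments (classify_segments_py segments)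

-- ===== LEMMAS AND PROOFS =====

-- each occurrence of l in xs either consumes one unit of the counter's budget for l or lands in acc
lemma pruneLoop_count (l : String) :
    ∀ (xs : List String) (c : PySem.Dict String Int) (acc : List String) (n : ℕ),
      c.getD l 0 = (n : ℤ) →
      ((pruneLoop xs c acc).2).count l = acc.count l + (xs.count l - n) := by
  intro xs
  induction xs with
  | nil => intro c acc n h; simp [pruneLoop]
  | cons x rest ih =>
    intro c acc n h
    by_cases hx : x = l
    · subst hx
      by_cases hn : 0 < n
      · have hpos : c.getD x 0 > 0 := by rw [h]; exact_mod_cast hn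
        rw [pruneLoop, if_pos hpos]
        have h' : (c.insert x (c.getD x 0 - 1)).getD x 0 = ((n - 1 : ℕ) : ℤ) := by
          rw [PySem.Dict.getD_insert_self, h]; omega
        rw [ih _ _ _ h']
        simp
        omega
      · have hz : n = 0 := by omega
        subst hz
        have hnpos : ¬ c.getD x 0 > 0 := by rw [h]; simp
        rw [pruneLoop, if_neg hnpos]
        rw [ih _ _ _ h]
        simp [List.count_append]
        omega
    · have hcnt : (x :: rest).count l = rest.count l := by
        simp [hx]
      by_cases hpos : c.getD x 0 > 0
      · rw [pruneLoop, if_pos hpos]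
        have h' : (c.insert x (c.getD x 0 - 1)).getD l 0 = (n : ℤ) := by
          rw [PySem.Dict.getD_insert_of_ne]
          · exact h
          · exact fun hh => hx hh.symm
        rw [ih _ _ _ h', hcnt]
      · rw [pruneLoop, if_neg hpos]
        rw [ih _ _ _ h, hcnt]
        have : (acc ++ [x]).count l = acc.count l := by
          simp [List.count_append, hx]
        rw [this]

lemma prune_fst_count (o t : List String) (l : String) :
    ((prune_common_lines o t).1).count l = o.count l - t.count l := by
  have h : (PySem.Dict.counter t).getD l 0 = ((t.count l : ℕ) : ℤ) := by
    simp [PySem.Dict.getD_counter]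
  simpa using pruneLoop_count l o (PySem.Dict.counter t) [] (t.count l) h

lemma prune_snd_count (o t : List String) (l : String) :
    ((prune_common_lines o t).2).count l = t.count l - o.count l := by
  have h : (PySem.Dict.counter o).getD l 0 = ((o.count l : ℕ) : ℤ) := by
    simp [PySem.Dict.getD_counter]
  simpa using pruneLoop_count l t (PySem.Dict.counter o) [] (o.count l) h

lemma count_filter_if (l : String) (o : List String) (p : String → Bool) :
    (o.filter p).count l = if p l then o.count l else 0 := by
  induction o with
  | nil => simp
  | cons x xs ih =>
    by_cases hx : x = l
    · subst hx
      by_cases hp : p x <;> simp [hp, ih]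
    · by_cases hp : p x <;> simp [hp, hx, ih]

-- the surviving lines are all comments iff the code lines of the two sides agree as multisets
lemma seg_all_iff_perm (o t : List String) :
    (((prune_common_lines o t).1 ++ (prune_common_lines o t).2).all is_comment_line = true)
    ↔ (o.filter (fun l => !is_comment_line l)).Perm (t.filter (fun l => !is_comment_line l)) := by
  rw [List.perm_iff_count, List.all_eq_true]
  constructor
  · intro h l
    rw [count_filter_if, count_filter_if]
    by_cases hc : is_comment_line l = true
    · simp [hc]
    · have hc' : is_comment_line l = false := by revert hc; cases is_comment_line l <;> simp
      simp only [hc', Bool.not_false, if_true]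
      by_contra hne
      have hmem : l ∈ (prune_common_lines o t).1 ++ (prune_common_lines o t).2 := by
        rw [← List.count_pos_iff, List.count_append, prune_fst_count, prune_snd_count]
        omega
      exact hc (h l hmem)
  · intro h l hmem
    by_contra hc
    have := h l
    have hc' : is_comment_line l = false := by revert hc; cases is_comment_line l <;> simp
    rw [count_filter_if, count_filter_if] at this
    simp only [hc', Bool.not_false, if_true] at this
    rw [← List.count_pos_iff, List.count_append, prune_fst_count, prune_snd_count] at hmem
    omega

lemma loops_eq : ∀ (segs : List (List String × List String)),
    classifyLoopA segs = classifyLoopB segs := by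
  intro segs
  induction segs with
  | nil => rfl
  | cons hd rest ih =>
    obtain ⟨o, t⟩ := hd
    rw [classifyLoopA, classifyLoopB]
    simp only [Multiset.coe_eq_coe, ne_eq, ite_not]
    by_cases hp : (o.filter (fun l => !is_comment_line l)).Perm (t.filter (fun l => !is_comment_line l))
    · have hall := (seg_all_iff_perm o t).2 hp
      simp [hall, hp, ih]
    · have hall : ¬ (((prune_common_lines o t).1 ++ (prune_common_lines o t).2).all is_comment_line = true) :=
        fun h => hp ((seg_all_iff_perm o t).1 h)
      have hne : ¬ ((prune_common_lines o t).1 ++ (prune_common_lines o t).2).isEmpty = true := by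
        intro he
        apply hall
        rw [List.isEmpty_iff] at he
        simp [he]
      simp [hne, hall, hp]

-- ===== VERDICT (by name: the statement is the Claim_ definition above) =====
theorem classify_segments_py_spec : Claim_equal_classify_segments_py := by
  intro segs _
  unfold Spec_classify_segments_py classify_segments_py classify_segments_py_alt
  by_cases h : segs.isEmpty <;> simp [h, loops_eq]
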